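-- pv_equiv track=rewrite | github.com/cwalv/reporoot | src/reporoot/integrations/vscode_workspace.py | _collapse_excludes
-- ===== SOURCE A (Python) =====
-- from collections import defaultdict
--
-- def _collapse_excludes(excluded_repos: set[str], all_repos_on_disk: set[str]) -> set[str]:
--     """Collapse exclude paths up the directory hierarchy.
--
--     If all repos under an owner (registry/owner) are excluded, replace them
--     with the owner path.  Then if all owners under a registry are excluded,
--     replace them with the registry path.
--     """
--     # Group all on-disk repos by owner and registry.
--     repos_by_owner: dict[str, set[str]] = defaultdict(set)
--     for repo in all_repos_on_disk:
--         parts = repo.split("/")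
--         owner = "/".join(parts[:2])
--         repos_by_owner[owner].add(repo)
--
--     # Collapse owners: if every repo under an owner is excluded, use the owner.
--     collapsed: set[str] = set()
--     collapsed_owners: set[str] = set()
--     for owner, repos in repos_by_owner.items():
--         if repos <= excluded_repos:
--             collapsed.add(owner)
--             collapsed_owners.add(owner)
--         else:
--             collapsed.update(repos & excluded_repos)
--
--     # Collapse registries: if every owner under a registry is collapsed,
--     # use the registry.
--     owners_by_registry: dict[str, set[str]] = defaultdict(set)
--     for owner in repos_by_owner:
--         registry = owner.split("/")[0]
--         owners_by_registry[registry].add(owner)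
--
--     for registry, owners in owners_by_registry.items():
--         if owners <= collapsed_owners:
--             collapsed -= owners
--             collapsed.add(registry)
--
--     return collapsed
-- ===== SOURCE B (Python) =====
-- def _collapse_excludes(excluded_repos: set[str], all_repos_on_disk: set[str]) -> set[str]:
--     """Collapse exclude paths up the directory hierarchy.
--
--     Specification-style brute force: no grouping dictionaries at all.  The
--     paths are split once into (registry, owner, repo) triples; each owner's
--     and registry's 'fully excluded' status is decided by a direct scan of the
--     triples (a registry collapses iff every repo under it is excluded), and
--     the result is emitted in one comprehension per level.
--     """
--     def owner_of(repo):
--         return "/".join(repo.split("/")[:2])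
--
--     def registry_of(path):
--         return path.split("/")[0]
--
--     disk = [(registry_of(r), owner_of(r), r) for r in all_repos_on_disk]
--     owners = list(dict.fromkeys(o for _, o, _ in disk))
--
--     def owner_full(owner):
--         return all(r in excluded_repos for _, o, r in disk if o == owner)
--
--     def registry_full(registry):
--         return all(r in excluded_repos for g, _, r in disk if g == registry)
--
--     result = [
--         path
--         for owner in owners
--         if not registry_full(registry_of(owner))
--         for path in ([owner] if owner_full(owner)
--                      else [r for _, o, r in disk if o == owner and r in excluded_repos])
--     ]
--     result += [g for g in dict.fromkeys(registry_of(o) for o in owners) if registry_full(g)]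
--     return set(result)
-- ===== Notes on version B (the rewrite author's own statement) =====
-- stated objective: alternative
-- what changed: A builds defaultdict groupings (repos by owner, owners by registry) and mutates a result set with subset tests, set differences and re-adds; B uses no grouping structures at all: it is a specification-style brute force that decides each owner's and registry's 'fully excluded' status by a direct scan of the on-disk paths and emits the result in one comprehension per level.
import Mathlib
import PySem

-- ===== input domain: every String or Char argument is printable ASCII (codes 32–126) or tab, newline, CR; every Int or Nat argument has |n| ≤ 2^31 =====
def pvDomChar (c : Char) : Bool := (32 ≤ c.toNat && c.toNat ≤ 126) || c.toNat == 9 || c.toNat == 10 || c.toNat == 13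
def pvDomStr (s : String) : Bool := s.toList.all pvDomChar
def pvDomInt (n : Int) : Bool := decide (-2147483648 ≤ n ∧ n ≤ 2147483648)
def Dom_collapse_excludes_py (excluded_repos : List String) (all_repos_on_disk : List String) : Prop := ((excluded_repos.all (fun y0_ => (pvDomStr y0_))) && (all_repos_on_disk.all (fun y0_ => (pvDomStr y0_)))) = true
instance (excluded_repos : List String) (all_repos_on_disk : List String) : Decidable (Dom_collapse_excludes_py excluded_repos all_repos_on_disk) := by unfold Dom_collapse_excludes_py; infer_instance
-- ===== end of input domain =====

-- B replaces A's defaultdict grouping and destructive set patching by a specification-style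
-- brute force: no grouping structures, each owner/registry status is decided by a direct scan.
-- ===== PORT A =====
def collapse_excludes_py (excluded_repos : List String) (all_repos_on_disk : List String) : List String :=
  -- repos_by_owner: defaultdict(set); owner = "/".join(repo.split("/")[:2])
  let repos_by_owner : PySem.Dict String (PySem.Set String) :=
    all_repos_on_disk.foldl (fun d repo =>
      let parts := (PySem.Str.split? repo "/").getD []   -- split("/" ) never raises (sep ≠ "")
      let owner := PySem.Str.join "/" (PySem.List.slice parts none (some 2))
      d.modify owner PySem.Set.empty (fun s => PySem.Set.add s repo)) PySem.Dict.empty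
  -- collapse owners
  let step1 : PySem.Set String × PySem.Set String :=
    repos_by_owner.items.foldl (fun p kv =>
      if PySem.Set.issubset kv.2 excluded_repos then
        (PySem.Set.add p.1 kv.1, PySem.Set.add p.2 kv.1)
      else
        (PySem.Set.update p.1 (PySem.Set.inter kv.2 excluded_repos), p.2))
      (PySem.Set.empty, PySem.Set.empty)
  -- owners_by_registry: registry = owner.split("/")[0]; the [0] never raises (split is nonempty)
  let owners_by_registry : PySem.Dict String (PySem.Set String) :=
    repos_by_owner.keys.foldl (fun d owner =>
      let registry := (PySem.List.pyGet? ((PySem.Str.split? owner "/").getD []) 0).getD ""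
      d.modify registry PySem.Set.empty (fun s => PySem.Set.add s owner)) PySem.Dict.empty
  -- collapse registries
  owners_by_registry.items.foldl (fun collapsed kv =>
    if PySem.Set.issubset kv.2 step1.2 then
      PySem.Set.add (PySem.Set.diff collapsed kv.2) kv.1
    else collapsed) step1.1

-- ===== PORT B =====
def collapse_excludes_py_alt (excluded_repos : List String) (all_repos_on_disk : List String) : List String :=
  let owner_of : String → String := fun repo =>
    PySem.Str.join "/" (PySem.List.slice ((PySem.Str.split? repo "/").getD []) none (some 2))
  let registry_of : String → String := fun path =>
    (PySem.List.pyGet? ((PySem.Str.split? path "/").getD []) 0).getD ""   -- [0] never raises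
  let disk := all_repos_on_disk.map (fun r => (registry_of r, owner_of r, r))
  let owners := PySem.Set.ofList (disk.map (fun t => t.2.1))               -- dict.fromkeys dedup
  let owner_full : String → Bool := fun owner =>
    (disk.filter (fun t => t.2.1 == owner)).all
      (fun t => excluded_repos.contains t.2.2)
  let registry_full : String → Bool := fun registry =>
    (disk.filter (fun t => t.1 == registry)).all
      (fun t => excluded_repos.contains t.2.2)
  let result : List String :=
    owners.flatMap (fun owner =>
      if registry_full (registry_of owner) then []
      else if owner_full owner then [owner]
      else (disk.filter (fun t => t.2.1 == owner && excluded_repos.contains t.2.2)).map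
        (fun t => t.2.2))
  let result2 := result ++
    (PySem.Set.ofList (owners.map registry_of)).filter registry_full
  PySem.Set.ofList result2

-- ===== PRECONDITION & SPEC =====
def Spec_collapse_excludes_py (excluded_repos : List String) (all_repos_on_disk : List String) (out : List String) : Prop := out = collapse_excludes_py_alt excluded_repos all_repos_on_disk
instance (excluded_repos : List String) (all_repos_on_disk : List String) (out : List String) : Decidable (Spec_collapse_excludes_py excluded_repos all_repos_on_disk out) := by unfold Spec_collapse_excludes_py; infer_instance

-- ===== CLAIM (what is proved, stated in full; the proofs are below) =====
def Claim_equal_collapse_excludes_py : Prop := ∀ (excluded_repos : List String) (all_repos_on_disk : List String), Dom_collapse_excludes_py excluded_repos all_repos_on_disk → Spec_collapse_excludes_py excluded_repos all_repos_on_disk (collapse_excludes_py excluded_repos all_repos_on_disk)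

-- ===== LEMMAS AND PROOFS =====

-- ---- Python str.split("/") and "/".join: exact characterization ----

def mySplit : List Char → List (List Char)
  | [] => [[]]
  | c :: cs => if c = '/' then [] :: mySplit cs else (mySplit cs).modifyHead (c :: ·)

theorem mySplit_ne_nil (cs : List Char) : mySplit cs ≠ [] := by
  cases cs with
  | nil => simp [mySplit]
  | cons c cs =>
    simp only [mySplit]
    split <;> simp [List.modifyHead_eq_nil_iff, mySplit_ne_nil cs]

theorem go_eq (fuel : Nat) (l cur : List Char) (acc : List (List Char)) (h : l.length < fuel) :
    PySem.Chars.splitOn.go ['/'] fuel l cur acc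
      = acc.reverse ++ ((mySplit l).modifyHead (cur.reverse ++ ·)) := by
  induction fuel generalizing l cur acc with
  | zero => omega
  | succ fuel ih =>
    cases l with
    | nil => simp [PySem.Chars.splitOn.go, mySplit]
    | cons c rest =>
      rw [PySem.Chars.splitOn.go]
      by_cases hc : c = '/'
      · subst hc
        simp only [List.isPrefixOf, BEq.rfl, Bool.true_and, List.isPrefixOf_nil_left, if_pos]
        rw [ih _ _ _ (by simpa using Nat.lt_of_succ_lt_succ h)]
        obtain ⟨p, ps, hp⟩ := List.exists_cons_of_ne_nil (mySplit_ne_nil rest)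
        simp [mySplit, hp]
      · have : ¬ (List.isPrefixOf ['/'] (c :: rest) = true) := by
          simp [List.isPrefixOf]; exact fun hh => (hc hh.symm).elim
        rw [if_neg this, ih _ _ _ (by simpa using Nat.lt_of_succ_lt_succ h)]
        simp only [mySplit, if_neg hc]
        obtain ⟨p, ps, hp⟩ := List.exists_cons_of_ne_nil (mySplit_ne_nil rest)
        simp [hp]
theorem splitOn_slash (cs : List Char) : PySem.Chars.splitOn cs ['/'] = mySplit cs := by
  rw [PySem.Chars.splitOn, go_eq _ _ _ _ (by omega)]
  obtain ⟨p, ps, hp⟩ := List.exists_cons_of_ne_nil (mySplit_ne_nil cs)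
  simp [hp]

theorem no_slash_mem (cs : List Char) : ∀ p ∈ mySplit cs, '/' ∉ p := by
  induction cs with
  | nil => simp [mySplit]
  | cons c cs ih =>
    simp only [mySplit]
    split
    · simpa using ih
    · obtain ⟨p, ps, hp⟩ := List.exists_cons_of_ne_nil (mySplit_ne_nil cs)
      rw [hp]
      intro q hq
      simp only [List.modifyHead, List.mem_cons] at hq
      rcases hq with h1 | h2
      · subst h1
        have hthis := ih p (by simp [hp])
        intro hmem
        rcases List.mem_cons.1 hmem with heq | hm
        · rename_i hc; exact hc heq.symm
        · exact hthis hm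
      · exact ih q (by simp [hp, h2])

theorem mySplit_append_no_slash (p t : List Char) (hp : '/' ∉ p) :
    mySplit (p ++ t) = (mySplit t).modifyHead (p ++ ·) := by
  induction p with
  | nil =>
    obtain ⟨q, qs, hq⟩ := List.exists_cons_of_ne_nil (mySplit_ne_nil t)
    simp [hq]
  | cons c p ih =>
    have hc : c ≠ '/' := by intro h; exact hp (by simp [h])
    have hp' : '/' ∉ p := fun h => hp (by simp [h])
    simp only [List.cons_append, mySplit, if_neg hc, ih hp']
    obtain ⟨q, qs, hq⟩ := List.exists_cons_of_ne_nil (mySplit_ne_nil t)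
    simp [hq]

theorem mySplit_no_slash (p : List Char) (hp : '/' ∉ p) : mySplit p = [p] := by
  have := mySplit_append_no_slash p [] hp
  simpa [mySplit] using this

theorem mySplit_intercalate (parts : List (List Char)) (hne : parts ≠ [])
    (hp : ∀ p ∈ parts, '/' ∉ p) :
    mySplit (List.intercalate ['/'] parts) = parts := by
  induction parts with
  | nil => simp at hne
  | cons p ps ih =>
    cases ps with
    | nil => simpa [List.intercalate] using mySplit_no_slash p (hp p (by simp))
    | cons q qs =>
      have : List.intercalate ['/'] (p :: q :: qs) = p ++ '/' :: List.intercalate ['/'] (q :: qs) := by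
        simp [List.intercalate, List.intersperse]
      rw [this, mySplit_append_no_slash p _ (hp p (by simp))]
      have hrec := ih (by simp) (fun r hr => hp r (by simp [hr]))
      rw [show mySplit ('/' :: List.intercalate ['/'] (q :: qs)) = [] :: mySplit (List.intercalate ['/'] (q :: qs)) by simp [mySplit]]
      simp [hrec]

def cOwn (cs : List Char) : List Char := List.intercalate ['/'] ((mySplit cs).take 2)
def cReg (cs : List Char) : List Char := (mySplit cs).headI

theorem take2_ne_nil (cs : List Char) : (mySplit cs).take 2 ≠ [] := by
  obtain ⟨p, ps, hp⟩ := List.exists_cons_of_ne_nil (mySplit_ne_nil cs)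
  simp [hp]

theorem mySplit_cOwn (cs : List Char) : mySplit (cOwn cs) = (mySplit cs).take 2 := by
  exact mySplit_intercalate _ (take2_ne_nil cs) (fun p hp => no_slash_mem cs p (List.mem_of_mem_take hp))

theorem cOwn_cOwn (cs : List Char) : cOwn (cOwn cs) = cOwn cs := by
  show List.intercalate ['/'] ((mySplit (cOwn cs)).take 2) = cOwn cs
  rw [mySplit_cOwn]
  simp [List.take_take, cOwn]

theorem cReg_no_slash (cs : List Char) : '/' ∉ cReg cs := by
  apply no_slash_mem cs
  obtain ⟨p, ps, hp⟩ := List.exists_cons_of_ne_nil (mySplit_ne_nil cs)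
  simp [hp, cReg]

theorem mySplit_cReg (cs : List Char) : mySplit (cReg cs) = [cReg cs] :=
  mySplit_no_slash _ (cReg_no_slash cs)

theorem cOwn_cReg (cs : List Char) : cOwn (cReg cs) = cReg cs := by
  show List.intercalate ['/'] ((mySplit (cReg cs)).take 2) = cReg cs
  rw [mySplit_cReg]
  simp [List.intercalate]

theorem cReg_cOwn (cs : List Char) : cReg (cOwn cs) = cReg cs := by
  show (mySplit (cOwn cs)).headI = (mySplit cs).headI
  rw [mySplit_cOwn]
  obtain ⟨p, ps, hp⟩ := List.exists_cons_of_ne_nil (mySplit_ne_nil cs)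
  simp [hp]

theorem cReg_cReg (cs : List Char) : cReg (cReg cs) = cReg cs := by
  show (mySplit (cReg cs)).headI = cReg cs
  rw [mySplit_cReg]
  rfl

-- ===== String level =====
def pParts (s : String) : List String := (PySem.Str.split? s "/").getD []
def pOwn (s : String) : String := PySem.Str.join "/" (PySem.List.slice (pParts s) none (some 2))
def pReg (s : String) : String := (PySem.List.pyGet? (pParts s) 0).getD ""

theorem pParts_eq (s : String) : pParts s = (mySplit s.toList).map String.ofList := by
  simp [pParts, PySem.Str.split?, PySem.Chars.split?, splitOn_slash]

theorem toList_pOwn (s : String) : (pOwn s).toList = cOwn s.toList := by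
  rw [pOwn, PySem.Str.toList_join, pParts_eq,
      PySem.List.slice_to _ (by norm_num)]
  show PySem.Chars.join _ _ = _
  rw [PySem.Chars.join]
  simp only [← List.map_take, List.map_map]
  have : (String.toList ∘ String.ofList) = id := by funext l; simp
  rw [this, List.map_id]
  rfl

theorem toList_pReg (s : String) : (pReg s).toList = cReg s.toList := by
  rw [pReg, pParts_eq]
  obtain ⟨p, ps, hp⟩ := List.exists_cons_of_ne_nil (mySplit_ne_nil s.toList)
  rw [hp]
  simp only [List.map_cons]
  rw [show ((0 : Int)) = ((0 : Nat) : Int) by norm_num, PySem.List.pyGet?_natCast]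
  simp [cReg, hp]

theorem pOwn_pOwn (s : String) : pOwn (pOwn s) = pOwn s := by
  apply String.toList_injective
  rw [toList_pOwn, toList_pOwn, cOwn_cOwn]

theorem pOwn_pReg (s : String) : pOwn (pReg s) = pReg s := by
  apply String.toList_injective
  rw [toList_pOwn, toList_pReg, cOwn_cReg]

theorem pReg_pReg (s : String) : pReg (pReg s) = pReg s := by
  apply String.toList_injective
  rw [toList_pReg, toList_pReg, cReg_cReg]

theorem pReg_pOwn (s : String) : pReg (pOwn s) = pReg s := by
  apply String.toList_injective
  rw [toList_pReg, toList_pOwn, toList_pReg, cReg_cOwn]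

-- ---- generic characterization of a dict built by foldl/modify ----

theorem find?_map_eq {ν : Type} (m : List String) (g : String → ν) (k : String) :
    List.find? (fun p => p.1 == k) (m.map (fun j => (j, g j)))
      = if k ∈ m then some (k, g k) else none := by
  induction m with
  | nil => simp
  | cons a m ih =>
    by_cases h : a = k
    · subst h; simp [List.find?]
    · have h' : ¬ k = a := fun hh => h hh.symm
      simp only [List.map_cons, List.find?]
      rw [show ((a, g a).1 == k) = false by simp [h], ih]
      simp [h']

theorem get?_mapDict {ν : Type} (m : List String) (g : String → ν) (k : String) :
    (PySem.Dict.mk (m.map (fun j => (j, g j)))).get? k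
      = if k ∈ m then some (g k) else none := by
  simp only [PySem.Dict.get?, find?_map_eq]
  split <;> simp

theorem contains_mapDict {ν : Type} (m : List String) (g : String → ν) (k : String) :
    (PySem.Dict.mk (m.map (fun j => (j, g j)))).contains k = decide (k ∈ m) := by
  rw [PySem.Dict.contains_eq_isSome_get?, get?_mapDict]
  split <;> simp_all

theorem insert_mapDict_mem {ν : Type} (m : List String) (hm : m.Nodup) (g : String → ν)
    (k : String) (hk : k ∈ m) (v : ν) :
    (PySem.Dict.mk (m.map (fun j => (j, g j)))).insert k v
      = PySem.Dict.mk (m.map (fun j => (j, if j = k then v else g j))) := by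
  rw [PySem.Dict.insert, if_pos (by rw [contains_mapDict]; simpa)]
  congr 1
  simp only [List.map_map]
  apply List.map_congr_left
  intro j hj
  by_cases h : j = k
  · subst h; simp
  · simp [h]

theorem insert_mapDict_not_mem {ν : Type} (m : List String) (g : String → ν)
    (k : String) (hk : k ∉ m) (v : ν) :
    (PySem.Dict.mk (m.map (fun j => (j, g j)))).insert k v
      = PySem.Dict.mk (m.map (fun j => (j, g j)) ++ [(k, v)]) := by
  rw [PySem.Dict.insert, if_neg (by rw [contains_mapDict]; simpa)]

def grpFold {β ν : Type} (key : β → String) (f : β → ν → ν) (d0 : ν) (l : List β) (k : String) : ν :=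
  (l.filter (fun x => key x == k)).foldl (fun v x => f x v) d0

theorem filter_singleton_ne {β : Type} (key : β → String) (x : β) (j : String)
    (h : ¬ j = key x) : List.filter (fun y => key y == j) [x] = [] := by
  have h' : ¬ key x = j := fun hh => h hh.symm
  simp [h']

theorem grpFold_append_ne {β ν : Type} (key : β → String) (f : β → ν → ν) (d0 : ν)
    (l : List β) (x : β) (j : String) (h : ¬ j = key x) :
    grpFold key f d0 (l ++ [x]) j = grpFold key f d0 l j := by
  simp only [grpFold, List.filter_append, filter_singleton_ne key x j h, List.append_nil]

theorem grpFold_append_self {β ν : Type} (key : β → String) (f : β → ν → ν) (d0 : ν)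
    (l : List β) (x : β) :
    grpFold key f d0 (l ++ [x]) (key x) = f x (grpFold key f d0 l (key x)) := by
  simp [grpFold, List.filter_append, List.foldl_append]

theorem dictOf_items {β ν : Type} (key : β → String) (f : β → ν → ν) (d0 : ν) (l : List β) :
    (l.foldl (fun d x => d.modify (key x) d0 (f x)) PySem.Dict.empty)
      = PySem.Dict.mk ((PySem.Set.ofList (l.map key)).map
          (fun k => (k, grpFold key f d0 l k))) := by
  induction l using List.reverseRecOn with
  | nil => rfl
  | append_singleton l x ih =>
    rw [List.foldl_append, List.foldl_cons, List.foldl_nil, ih]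
    have hnd : (PySem.Set.ofList (l.map key)).Nodup := PySem.Set.nodup_ofList _
    have hofl : PySem.Set.ofList ((l ++ [x]).map key)
        = PySem.Set.add (PySem.Set.ofList (l.map key)) (key x) := by
      simp only [List.map_append, PySem.Set.ofList, List.foldl_append, List.map_cons,
        List.map_nil, List.foldl_cons, List.foldl_nil]
    rw [PySem.Dict.modify, PySem.Dict.getD,
        get?_mapDict (PySem.Set.ofList (l.map key)) (fun k => grpFold key f d0 l k) (key x),
        hofl]
    by_cases hk : key x ∈ PySem.Set.ofList (l.map key)
    · rw [if_pos hk, Option.getD_some,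
        insert_mapDict_mem _ hnd _ _ hk, PySem.Set.add,
        if_pos (by simpa using hk)]
      congr 1
      apply List.map_congr_left
      intro j hj
      by_cases h : j = key x
      · subst h
        rw [if_pos rfl, grpFold_append_self]
      · rw [if_neg h, grpFold_append_ne key f d0 l x j h]
    · rw [if_neg hk, Option.getD_none,
        insert_mapDict_not_mem _ _ _ hk, PySem.Set.add,
        if_neg (by simpa using hk), List.map_append]
      have h1 : List.map (fun j => (j, grpFold key f d0 l j)) (PySem.Set.ofList (l.map key))
          = List.map (fun k => (k, grpFold key f d0 (l ++ [x]) k)) (PySem.Set.ofList (l.map key)) := by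
        apply List.map_congr_left
        intro j hj
        have h : ¬ j = key x := fun h => hk (h ▸ hj)
        rw [grpFold_append_ne key f d0 l x j h]
      have h2 : grpFold key f d0 (l ++ [x]) (key x) = f x d0 := by
        rw [grpFold_append_self]
        have h3 : grpFold key f d0 l (key x) = d0 := by
          rw [grpFold, List.filter_eq_nil_iff.2, List.foldl_nil]
          intro y hy
          simp only [beq_iff_eq]
          intro hkey
          exact hk ((PySem.Set.mem_ofList _ _).2 (hkey ▸ List.mem_map_of_mem hy))
        rw [h3]
      rw [h1, List.map_cons, List.map_nil, h2]

-- ---- small PySem.Set lemmas ----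

theorem update_disj (s : PySem.Set String) (xs : List String) (h : ∀ y ∈ xs, y ∉ s) :
    PySem.Set.update s xs = s ++ PySem.Set.ofList xs := by
  rw [PySem.Set.update_eq_append_filter]
  congr 1
  apply List.filter_eq_self.2
  intro y hy
  have : y ∈ xs := (PySem.Set.mem_ofList _ _).1 hy
  simp [PySem.Set.contains_iff] at *
  exact h y this

theorem ofList_append_disj (xs ys : List String) (h : ∀ y ∈ ys, y ∉ xs) :
    PySem.Set.ofList (xs ++ ys) = PySem.Set.ofList xs ++ PySem.Set.ofList ys := by
  rw [PySem.Set.ofList_append, update_disj]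
  intro y hy
  rw [PySem.Set.mem_ofList]
  exact h y hy

theorem ofList_filter (p : String → Bool) (l : List String) :
    PySem.Set.ofList (l.filter p) = (PySem.Set.ofList l).filter p := by
  induction l using List.reverseRecOn with
  | nil => rfl
  | append_singleton l x ih =>
    rw [List.filter_append, PySem.Set.ofList_append_singleton]
    by_cases hx : p x = true
    · rw [show List.filter p [x] = [x] by simp [hx]]
      rw [PySem.Set.ofList_append_singleton, ih]
      by_cases hm : x ∈ PySem.Set.ofList l
      · rw [PySem.Set.add_of_mem hm, PySem.Set.add_of_mem]
        rw [List.mem_filter]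
        exact ⟨hm, hx⟩
      · rw [PySem.Set.add_of_not_mem hm, PySem.Set.add_of_not_mem
          (fun hc => hm (List.mem_filter.1 hc).1), List.filter_append]
        simp [hx]
    · rw [show List.filter p [x] = [] by simp [hx], List.append_nil, ih]
      by_cases hm : x ∈ PySem.Set.ofList l
      · rw [PySem.Set.add_of_mem hm]
      · rw [PySem.Set.add_of_not_mem hm, List.filter_append]
        simp [hx]

theorem issubset_ofList_all (l t : List String) :
    PySem.Set.issubset (PySem.Set.ofList l) t = l.all (fun x => t.contains x) := by
  rw [Bool.eq_iff_iff, PySem.Set.issubset_iff, List.all_eq_true]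
  constructor
  · intro h x hx
    have := h x ((PySem.Set.mem_ofList _ _).2 hx)
    simpa [PySem.Set.contains_iff] using this
  · intro h x hx
    have := h x ((PySem.Set.mem_ofList _ _).1 hx)
    simpa [PySem.Set.contains_iff] using this

-- ---- abbreviations for the common intermediate values ----
def ownersOf (repos : List String) : List String := PySem.Set.ofList (repos.map pOwn)
def grpOf (repos : List String) (o : String) : List String := repos.filter (fun r => pOwn r == o)
def flgOf (E repos : List String) (o : String) : Bool := (grpOf repos o).all (fun r => E.contains r)
def regsOf (repos : List String) : List String := PySem.Set.ofList ((ownersOf repos).map pReg)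
def rflgOf (E repos : List String) (g : String) : Bool :=
  ((ownersOf repos).filter (fun o => pReg o == g)).all (flgOf E repos)
def rregOf (E repos : List String) (g : String) : Bool :=
  (repos.filter (fun r => pReg r == g)).all (fun r => E.contains r)
def blockOf (E repos : List String) (o : String) : List String :=
  if flgOf E repos o then [o]
  else (PySem.Set.ofList (grpOf repos o)).filter (fun r => E.contains r)
def targetOf (E repos : List String) : List String :=
  (ownersOf repos).flatMap (fun o => if rflgOf E repos (pReg o) then [] else blockOf E repos o)
    ++ (regsOf repos).filter (rflgOf E repos)

-- the two ports, restated through pOwn / pReg / flgOf / rflgOf (definitional)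
theorem portA_restate (E repos : List String) :
    collapse_excludes_py E repos =
      (let RB : PySem.Dict String (PySem.Set String) :=
        repos.foldl (fun d r => d.modify (pOwn r) PySem.Set.empty (fun s => PySem.Set.add s r))
          PySem.Dict.empty
      let step1 : PySem.Set String × PySem.Set String :=
        RB.items.foldl (fun p kv =>
          if PySem.Set.issubset kv.2 E then
            (PySem.Set.add p.1 kv.1, PySem.Set.add p.2 kv.1)
          else
            (PySem.Set.update p.1 (PySem.Set.inter kv.2 E), p.2))
          (PySem.Set.empty, PySem.Set.empty)
      let OBR : PySem.Dict String (PySem.Set String) :=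
        RB.keys.foldl (fun d o => d.modify (pReg o) PySem.Set.empty (fun s => PySem.Set.add s o))
          PySem.Dict.empty
      OBR.items.foldl (fun collapsed kv =>
        if PySem.Set.issubset kv.2 step1.2 then
          PySem.Set.add (PySem.Set.diff collapsed kv.2) kv.1
        else collapsed) step1.1) := rfl

theorem portB_restate (E repos : List String) :
    collapse_excludes_py_alt E repos =
      PySem.Set.ofList
        ((ownersOf repos).flatMap (fun o =>
            if rregOf E repos (pReg o) then []
            else if flgOf E repos o then [o]
            else repos.filter (fun r => pOwn r == o && E.contains r))
          ++ (regsOf repos).filter (rregOf E repos)) := by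
  unfold collapse_excludes_py_alt
  simp only [List.filter_map, List.map_map, List.all_map, Function.comp_def]
  simp only [List.map_id']
  rfl

-- ---- basic facts about the owner / registry lists ----
theorem nodup_ownersOf (repos : List String) : (ownersOf repos).Nodup :=
  PySem.Set.nodup_ofList _

theorem pOwn_of_mem_owners {repos : List String} {o : String} (h : o ∈ ownersOf repos) :
    pOwn o = o := by
  rw [ownersOf, PySem.Set.mem_ofList] at h
  obtain ⟨r, _, rfl⟩ := List.mem_map.1 h
  exact pOwn_pOwn r

theorem nodup_regsOf (repos : List String) : (regsOf repos).Nodup :=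
  PySem.Set.nodup_ofList _

theorem pReg_of_mem_regs {repos : List String} {g : String} (h : g ∈ regsOf repos) :
    pReg g = g := by
  rw [regsOf, PySem.Set.mem_ofList] at h
  obtain ⟨o, _, rfl⟩ := List.mem_map.1 h
  exact pReg_pReg o

theorem pOwn_of_mem_regs {repos : List String} {g : String} (h : g ∈ regsOf repos) :
    pOwn g = g := by
  rw [regsOf, PySem.Set.mem_ofList] at h
  obtain ⟨o, _, rfl⟩ := List.mem_map.1 h
  exact pOwn_pReg o

theorem pReg_mem_regsOf {repos : List String} {o : String} (h : o ∈ ownersOf repos) :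
    pReg o ∈ regsOf repos := by
  rw [regsOf, PySem.Set.mem_ofList]
  exact List.mem_map_of_mem h

theorem pOwn_of_mem_grp {repos : List String} {o x : String} (h : x ∈ grpOf repos o) :
    pOwn x = o := by
  have := (List.mem_filter.1 h).2
  simpa using this

theorem pOwn_of_mem_block {E repos : List String} {o x : String} (ho : pOwn o = o)
    (h : x ∈ blockOf E repos o) : pOwn x = o := by
  by_cases hf : flgOf E repos o = true
  · rw [blockOf, if_pos hf] at h
    simp only [List.mem_singleton] at h
    rw [h]; exact ho
  · rw [blockOf, if_neg hf] at h
    have hx := (List.mem_filter.1 h).1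
    exact pOwn_of_mem_grp ((PySem.Set.mem_ofList _ _).1 hx)

theorem nodup_blockOf (E repos : List String) (o : String) : (blockOf E repos o).Nodup := by
  by_cases hf : flgOf E repos o = true
  · rw [blockOf, if_pos hf]; simp
  · rw [blockOf, if_neg hf]; exact (PySem.Set.nodup_ofList _).filter _

-- ---- A phase 1: repos_by_owner ----
theorem A_RB (repos : List String) :
    repos.foldl (fun d r => d.modify (pOwn r) PySem.Set.empty (fun s => PySem.Set.add s r))
        PySem.Dict.empty
      = PySem.Dict.mk ((ownersOf repos).map (fun o => (o, PySem.Set.ofList (grpOf repos o)))) := by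
  rw [dictOf_items pOwn (fun r s => PySem.Set.add s r) PySem.Set.empty repos]
  rfl

-- ---- A phase 2: collapse owners ----
theorem A_step1 (E repos : List String) (ms : List String) (hnd : ms.Nodup)
    (hms : ∀ o ∈ ms, pOwn o = o) :
    (ms.map (fun o => (o, PySem.Set.ofList (grpOf repos o)))).foldl
        (fun (p : PySem.Set String × PySem.Set String) kv =>
          if PySem.Set.issubset kv.2 E then
            (PySem.Set.add p.1 kv.1, PySem.Set.add p.2 kv.1)
          else
            (PySem.Set.update p.1 (PySem.Set.inter kv.2 E), p.2))
        (PySem.Set.empty, PySem.Set.empty)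
      = (ms.flatMap (blockOf E repos), ms.filter (flgOf E repos)) := by
  rw [List.foldl_map]
  induction ms using List.reverseRecOn with
  | nil => rfl
  | append_singleton ms o ih =>
    have hnd' : ms.Nodup := hnd.sublist (List.sublist_append_left _ _)
    have honotin : o ∉ ms := by
      intro hc
      rw [List.nodup_append] at hnd
      exact hnd.2.2 o hc o (List.mem_singleton_self o) rfl
    have hms' : ∀ x ∈ ms, pOwn x = x := fun x hx => hms x (List.mem_append_left _ hx)
    have ho : pOwn o = o := hms o (List.mem_append_right _ (List.mem_singleton_self o))
    rw [List.foldl_append, ih hnd' hms', List.foldl_cons, List.foldl_nil]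
    have hblock_disj : ∀ x ∈ blockOf E repos o, x ∉ ms.flatMap (blockOf E repos) := by
      intro x hx hc
      obtain ⟨o', ho', hxo'⟩ := List.mem_flatMap.1 hc
      have h1 : pOwn x = o := pOwn_of_mem_block ho hx
      have h2 : pOwn x = o' := pOwn_of_mem_block (hms' o' ho') hxo'
      exact honotin ((h1 ▸ h2 : o = o') ▸ ho')
    rw [show PySem.Set.issubset (PySem.Set.ofList (grpOf repos o)) E = flgOf E repos o from
      (issubset_ofList_all _ _)]
    by_cases hf : flgOf E repos o = true
    · rw [if_pos hf]
      have hb : blockOf E repos o = [o] := by rw [blockOf, if_pos hf]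
      have ho_notin : o ∉ ms.flatMap (blockOf E repos) :=
        hblock_disj o (by rw [hb]; exact List.mem_singleton_self o)
      have ho_notin2 : o ∉ ms.filter (flgOf E repos) := by
        intro hc; exact honotin (List.mem_of_mem_filter hc)
      rw [PySem.Set.add_of_not_mem ho_notin, PySem.Set.add_of_not_mem ho_notin2]
      rw [List.flatMap_append, List.filter_append]
      simp [hb, hf]
    · rw [if_neg (by simp [hf])]
      have hb : blockOf E repos o
          = (PySem.Set.ofList (grpOf repos o)).filter (fun r => E.contains r) := by
        rw [blockOf, if_neg hf]
      rw [show PySem.Set.inter (PySem.Set.ofList (grpOf repos o)) E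
            = (PySem.Set.ofList (grpOf repos o)).filter (fun r => E.contains r) from rfl]
      rw [update_disj _ _ (fun y hy => hblock_disj y (by rw [hb]; exact hy))]
      rw [PySem.Set.ofList_eq_self_of_nodup _ (by rw [← hb]; exact nodup_blockOf E repos o)]
      rw [List.flatMap_append, List.filter_append]
      simp [hb, hf]

-- ---- A phase 3: owners_by_registry ----
def ownGrp (repos : List String) (g : String) : List String :=
  (ownersOf repos).filter (fun o => pReg o == g)

theorem nodup_ownGrp (repos : List String) (g : String) : (ownGrp repos g).Nodup :=
  (nodup_ownersOf repos).filter _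

theorem mem_ownGrp {repos : List String} {g x : String} :
    x ∈ ownGrp repos g ↔ x ∈ ownersOf repos ∧ pReg x = g := by
  rw [ownGrp, List.mem_filter]
  simp

theorem A_OBR (repos : List String) :
    (ownersOf repos).foldl
        (fun d o => d.modify (pReg o) PySem.Set.empty (fun s => PySem.Set.add s o))
        PySem.Dict.empty
      = PySem.Dict.mk ((regsOf repos).map (fun g => (g, (ownGrp repos g : PySem.Set String)))) := by
  rw [dictOf_items pReg (fun o s => PySem.Set.add s o) PySem.Set.empty (ownersOf repos)]
  congr 1
  apply List.map_congr_left
  intro g hg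
  congr 1
  show PySem.Set.ofList (ownGrp repos g) = _
  exact PySem.Set.ofList_eq_self_of_nodup _ (nodup_ownGrp repos g)

-- the registry-collapse condition of A equals the registry_full flag of B
theorem cond_eq (E repos : List String) (g : String) :
    PySem.Set.issubset (ownGrp repos g)
        ((ownersOf repos).filter (flgOf E repos)) = rflgOf E repos g := by
  rw [Bool.eq_iff_iff, PySem.Set.issubset_iff, rflgOf, List.all_eq_true]
  constructor
  · intro h o ho
    have := h o ho
    rw [List.mem_filter] at this
    exact this.2
  · intro h o ho
    rw [List.mem_filter]
    exact ⟨(mem_ownGrp.1 ho).1, h o ho⟩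

theorem not_contains_of_not_mem (s : List String) (x : String) (h : x ∉ s) :
    (!PySem.Set.contains s x) = true := by
  have hf : PySem.Set.contains s x = false := by
    cases hcc : PySem.Set.contains s x
    · rfl
    · exact absurd ((PySem.Set.contains_iff _ _).1 hcc) h
  rw [hf]
  rfl

-- ---- A phase 4: collapse registries ----
theorem A_final (E repos : List String) (gs : List String) (hnd : gs.Nodup)
    (hgs : ∀ g ∈ gs, pReg g = g ∧ pOwn g = g) :
    (gs.map (fun g => (g, (ownGrp repos g : PySem.Set String)))).foldl
        (fun collapsed kv =>
          if PySem.Set.issubset kv.2 ((ownersOf repos).filter (flgOf E repos)) then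
            PySem.Set.add (PySem.Set.diff collapsed kv.2) kv.1
          else collapsed)
        ((ownersOf repos).flatMap (blockOf E repos))
      = (ownersOf repos).flatMap (fun o =>
            if gs.contains (pReg o) && rflgOf E repos (pReg o) then [] else blockOf E repos o)
          ++ gs.filter (rflgOf E repos) := by
  rw [List.foldl_map]
  induction gs using List.reverseRecOn with
  | nil =>
    simp only [List.foldl_nil, List.filter_nil, List.append_nil]
    apply (List.flatMap_congr _).symm
    intro o ho
    simp
  | append_singleton gs g ih =>
    have hnd' : gs.Nodup := hnd.sublist (List.sublist_append_left _ _)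
    have hgnotin : g ∉ gs := by
      intro hc
      rw [List.nodup_append] at hnd
      exact hnd.2.2 g hc g (List.mem_singleton_self g) rfl
    have hgs' : ∀ x ∈ gs, pReg x = x ∧ pOwn x = x :=
      fun x hx => hgs x (List.mem_append_left _ hx)
    have hgreg : pReg g = g := (hgs g (List.mem_append_right _ (List.mem_singleton_self g))).1
    have hgown : pOwn g = g := (hgs g (List.mem_append_right _ (List.mem_singleton_self g))).2
    rw [List.foldl_append, ih hnd' hgs']
    simp only [List.foldl_cons, List.foldl_nil]
    rw [cond_eq]
    by_cases hr : rflgOf E repos g = true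
    · rw [if_pos hr]
      rw [PySem.Set.diff, List.filter_append, List.filter_flatMap]
      have hpart1 : (ownersOf repos).flatMap (fun o =>
            (if gs.contains (pReg o) && rflgOf E repos (pReg o) then ([] : List String)
             else blockOf E repos o).filter
              (fun x => !(PySem.Set.contains (ownGrp repos g) x)))
          = (ownersOf repos).flatMap (fun o =>
              if (gs ++ [g]).contains (pReg o) && rflgOf E repos (pReg o) then []
              else blockOf E repos o) := by
        apply List.flatMap_congr
        intro o ho
        have hoo : pOwn o = o := pOwn_of_mem_owners ho
        by_cases hpg : pReg o = g
        · have hof : flgOf E repos o = true :=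
            (List.all_eq_true.1 hr) o (mem_ownGrp.2 ⟨ho, hpg⟩)
          have hcond1 : (gs.contains (pReg o) && rflgOf E repos (pReg o)) = false := by
            rw [hpg]
            rw [show gs.contains g = false by
              cases hcc : gs.contains g
              · rfl
              · exact absurd (by simpa using hcc) hgnotin]
            simp
          have hcond2 : ((gs ++ [g]).contains (pReg o) && rflgOf E repos (pReg o)) = true := by
            rw [hpg, hr]
            simp
          rw [hcond1, hcond2, if_pos rfl, if_neg (by simp), blockOf, if_pos hof]
          simp only [List.filter_cons, List.filter_nil]
          rw [show (!PySem.Set.contains (ownGrp repos g) o) = false by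
            have : PySem.Set.contains (ownGrp repos g) o = true := by
              rw [PySem.Set.contains_iff]; exact mem_ownGrp.2 ⟨ho, hpg⟩
            rw [this]; rfl]
          simp
        · have hc2 : (gs ++ [g]).contains (pReg o) = gs.contains (pReg o) := by
            simp [hpg]
          rw [hc2]
          by_cases hcr : (gs.contains (pReg o) && rflgOf E repos (pReg o)) = true
          · rw [if_pos hcr, List.filter_nil]
          · rw [if_neg hcr]
            apply List.filter_eq_self.2
            intro x hx
            apply not_contains_of_not_mem
            intro hcx
            have hxg := mem_ownGrp.1 hcx
            have hxx : pOwn x = x := pOwn_of_mem_owners hxg.1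
            have hxo : x = o := by rw [← hxx, pOwn_of_mem_block hoo hx]
            exact hpg (hxo ▸ hxg.2)
      have hpart2 : (gs.filter (rflgOf E repos)).filter
            (fun x => !(PySem.Set.contains (ownGrp repos g) x))
          = gs.filter (rflgOf E repos) := by
        apply List.filter_eq_self.2
        intro x hx
        have hxgs := List.mem_of_mem_filter hx
        apply not_contains_of_not_mem
        intro hcx
        have hxg := mem_ownGrp.1 hcx
        have : x = g := by rw [← (hgs' x hxgs).1, hxg.2]
        exact hgnotin (this ▸ hxgs)
      rw [hpart1, hpart2]
      have hgnot : g ∉ (ownersOf repos).flatMap (fun o =>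
            if (gs ++ [g]).contains (pReg o) && rflgOf E repos (pReg o) then ([] : List String)
            else blockOf E repos o) ++ gs.filter (rflgOf E repos) := by
        intro hc
        rcases List.mem_append.1 hc with hc1 | hc2
        · obtain ⟨o, ho, hgo⟩ := List.mem_flatMap.1 hc1
          by_cases hcr : ((gs ++ [g]).contains (pReg o) && rflgOf E repos (pReg o)) = true
          · rw [if_pos hcr] at hgo; exact absurd hgo (List.not_mem_nil)
          · rw [if_neg hcr] at hgo
            have hgoeq : o = g := by
              rw [← pOwn_of_mem_block (pOwn_of_mem_owners ho) hgo, hgown]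
            rw [hgoeq] at hcr
            apply hcr
            rw [hgreg]
            simp [hr]
        · exact hgnotin (List.mem_of_mem_filter hc2)
      rw [PySem.Set.add_of_not_mem hgnot, List.append_assoc]
      congr 1
      rw [List.filter_append]
      simp [hr]
    · rw [if_neg (by simp [hr])]
      have h1 : (ownersOf repos).flatMap (fun o =>
            if gs.contains (pReg o) && rflgOf E repos (pReg o) then ([] : List String)
            else blockOf E repos o)
          = (ownersOf repos).flatMap (fun o =>
              if (gs ++ [g]).contains (pReg o) && rflgOf E repos (pReg o) then []
              else blockOf E repos o) := by
        apply List.flatMap_congr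
        intro o ho
        by_cases hpg : pReg o = g
        · have hrf : rflgOf E repos g = false := eq_false_of_ne_true hr
          rw [hpg, hrf]
          simp
        · rw [show (gs ++ [g]).contains (pReg o) = gs.contains (pReg o) by simp [hpg]]
      have h2 : gs.filter (rflgOf E repos) = (gs ++ [g]).filter (rflgOf E repos) := by
        rw [List.filter_append]
        simp [hr]
      rw [h1, h2]

-- ---- B side: the brute-force emission list, deduplicated, equals targetOf ----

def blockRawOf (E repos : List String) (o : String) : List String :=
  if rflgOf E repos (pReg o) then []
  else if flgOf E repos o then [o]
  else (grpOf repos o).filter (fun r => E.contains r)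

theorem pOwn_of_mem_blockRaw {E repos : List String} {o x : String} (ho : pOwn o = o)
    (h : x ∈ blockRawOf E repos o) : pOwn x = o := by
  by_cases h1 : rflgOf E repos (pReg o) = true
  · rw [blockRawOf, if_pos h1] at h
    exact absurd h (List.not_mem_nil)
  · by_cases h2 : flgOf E repos o = true
    · rw [blockRawOf, if_neg h1, if_pos h2] at h
      simp only [List.mem_singleton] at h
      rw [h]; exact ho
    · rw [blockRawOf, if_neg h1, if_neg h2] at h
      exact pOwn_of_mem_grp (List.mem_of_mem_filter h)

-- the fused single-pass filter of B equals the staged filter used in blockRawOf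
theorem fused_filter (E repos : List String) (o : String) :
    repos.filter (fun r => pOwn r == o && E.contains r)
      = (grpOf repos o).filter (fun r => E.contains r) := by
  rw [grpOf, List.filter_filter]
  exact List.filter_congr (fun r _ => Bool.and_comm ..)

-- the registry criterion of B (every repo of the registry excluded) equals A's
-- criterion (every owner of the registry fully excluded)
theorem rreg_eq_rflg (E repos : List String) (g : String) :
    rregOf E repos g = rflgOf E repos g := by
  rw [Bool.eq_iff_iff, rregOf, rflgOf, List.all_eq_true, List.all_eq_true]
  constructor
  · intro h o ho
    rw [flgOf, List.all_eq_true]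
    intro r hr
    have hog : pReg o = g := by simpa using (List.mem_filter.1 ho).2
    have hro : pOwn r = o := pOwn_of_mem_grp hr
    apply h
    rw [List.mem_filter]
    refine ⟨List.mem_of_mem_filter hr, ?_⟩
    simp [← pReg_pOwn r, hro, hog]
  · intro h r hr
    have hrg : pReg r = g := by simpa using (List.mem_filter.1 hr).2
    have hmem : pOwn r ∈ ownersOf repos := by
      rw [ownersOf, PySem.Set.mem_ofList]
      exact List.mem_map_of_mem (List.mem_of_mem_filter hr)
    have hreg : pReg (pOwn r) = g := by rw [pReg_pOwn, hrg]
    have hflg := h (pOwn r) (by rw [List.mem_filter]; exact ⟨hmem, by simp [hreg]⟩)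
    rw [flgOf, List.all_eq_true] at hflg
    exact hflg r (by rw [grpOf, List.mem_filter]; exact ⟨List.mem_of_mem_filter hr, by simp⟩)

theorem B_blocks (E repos : List String) :
    (ownersOf repos).flatMap (fun o =>
        if rregOf E repos (pReg o) then []
        else if flgOf E repos o then [o]
        else repos.filter (fun r => pOwn r == o && E.contains r))
      = (ownersOf repos).flatMap (blockRawOf E repos) := by
  apply List.flatMap_congr
  intro o ho
  rw [rreg_eq_rflg, fused_filter, blockRawOf]

theorem ofList_blocks (E repos : List String) (ms : List String) (hnd : ms.Nodup)
    (hms : ∀ o ∈ ms, pOwn o = o) :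
    PySem.Set.ofList (ms.flatMap (blockRawOf E repos))
      = ms.flatMap (fun o => if rflgOf E repos (pReg o) then [] else blockOf E repos o) := by
  induction ms using List.reverseRecOn with
  | nil => rfl
  | append_singleton ms o ih =>
    have hnd' : ms.Nodup := hnd.sublist (List.sublist_append_left _ _)
    have honotin : o ∉ ms := by
      intro hc
      rw [List.nodup_append] at hnd
      exact hnd.2.2 o hc o (List.mem_singleton_self o) rfl
    have hms' : ∀ x ∈ ms, pOwn x = x := fun x hx => hms x (List.mem_append_left _ hx)
    have ho : pOwn o = o := hms o (List.mem_append_right _ (List.mem_singleton_self o))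
    rw [List.flatMap_append, List.flatMap_singleton]
    rw [ofList_append_disj]
    · rw [ih hnd' hms', List.flatMap_append, List.flatMap_singleton]
      congr 1
      by_cases h1 : rflgOf E repos (pReg o) = true
      · rw [blockRawOf, if_pos h1, if_pos h1]
        rfl
      · by_cases h2 : flgOf E repos o = true
        · rw [blockRawOf, if_neg h1, if_pos h2, if_neg h1, blockOf, if_pos h2]
          rfl
        · rw [blockRawOf, if_neg h1, if_neg h2, if_neg h1, blockOf, if_neg h2]
          rw [show (grpOf repos o).filter (fun r => E.contains r)
                = List.filter (fun r => E.contains r) (grpOf repos o) from rfl]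
          rw [ofList_filter]
    · intro y hy hc
      obtain ⟨o', ho', hyo'⟩ := List.mem_flatMap.1 hc
      have h1 : pOwn y = o := pOwn_of_mem_blockRaw ho hy
      have h2 : pOwn y = o' := pOwn_of_mem_blockRaw (hms' o' ho') hyo'
      exact honotin ((h1 ▸ h2 : o = o') ▸ ho')

theorem B_ofList (E repos : List String) :
    PySem.Set.ofList ((ownersOf repos).flatMap (blockRawOf E repos)
        ++ (regsOf repos).filter (rflgOf E repos))
      = targetOf E repos := by
  rw [ofList_append_disj]
  · rw [ofList_blocks E repos (ownersOf repos) (nodup_ownersOf repos)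
        (fun o ho => pOwn_of_mem_owners ho)]
    rw [PySem.Set.ofList_eq_self_of_nodup _ ((nodup_regsOf repos).filter _)]
    rfl
  · intro y hy hc
    have hyregs := List.mem_of_mem_filter hy
    have hyr : rflgOf E repos y = true := (List.mem_filter.1 hy).2
    obtain ⟨o, ho, hyo⟩ := List.mem_flatMap.1 hc
    have hoy : o = y := by
      rw [← pOwn_of_mem_blockRaw (pOwn_of_mem_owners ho) hyo, pOwn_of_mem_regs hyregs]
    rw [hoy] at hyo
    rw [blockRawOf, pReg_of_mem_regs hyregs, if_pos hyr] at hyo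
    exact absurd hyo (List.not_mem_nil)

-- ---- assembling the two sides ----
theorem A_to_target (E repos : List String) :
    collapse_excludes_py E repos = targetOf E repos := by
  rw [portA_restate]
  simp only [A_RB, A_OBR, PySem.Dict.items, PySem.Dict.keys, List.map_map]
  rw [show ((fun (x : String × PySem.Set String) => x.1)
        ∘ (fun o => (o, PySem.Set.ofList (grpOf repos o)))) = id from rfl, List.map_id]
  simp only [A_OBR, PySem.Dict.items]
  rw [A_step1 E repos (ownersOf repos) (nodup_ownersOf repos)
      (fun o ho => pOwn_of_mem_owners ho)]
  simp only []
  rw [A_final E repos (regsOf repos) (nodup_regsOf repos)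
      (fun g hg => ⟨pReg_of_mem_regs hg, pOwn_of_mem_regs hg⟩)]
  rw [targetOf]
  congr 1
  apply List.flatMap_congr
  intro o ho
  rw [show (regsOf repos).contains (pReg o) = true by
    simpa using pReg_mem_regsOf ho]
  rw [Bool.true_and]

theorem B_to_target (E repos : List String) :
    collapse_excludes_py_alt E repos = targetOf E repos := by
  rw [portB_restate, B_blocks,
      List.filter_congr (fun g _ => rreg_eq_rflg E repos g), B_ofList]

theorem main_eq (E repos : List String) :
    collapse_excludes_py E repos = collapse_excludes_py_alt E repos := by
  rw [A_to_target, B_to_target]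

-- ===== VERDICT (by name: the statement is the Claim_ definition above) =====
theorem collapse_excludes_py_spec : Claim_equal_collapse_excludes_py := by
  intro E repos _
  unfold Spec_collapse_excludes_py
  exact main_eq E repos
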